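-- pv_equiv track=rewrite | github.com/threeOldFarmers/rpr-rag | retriever.py | path_to_string
-- ===== SOURCE A (Python) =====
-- def path_to_string(path: list) -> str:
--     result = ""
--     for i, p in enumerate(path):
--         if i == 0:
--             h, r, t = p
--             result += f"{h} -> {r} -> {t}"
--         else:
--             _, r, t = p
--             result += f" -> {r} -> {t}"
--
--     return result.strip()
-- ===== SOURCE B (Python) =====
-- def path_to_string(path: list) -> str:
--     if not path:
--         return ""
--     tokens = [path[0][0]]
--     for _, r, t in path:
--         tokens.extend([r, t])
--     return " -> ".join(map(str, tokens)).strip()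
-- ===== Notes on version B (the rewrite author's own statement) =====
-- stated objective: simpler
-- what changed: B collects all tokens (head of first triple, then each relation/tail) into one flat list and emits the string with a single ' -> '.join, replacing A's enumerate loop with its i==0 branch and repeated string +=.
import Mathlib
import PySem

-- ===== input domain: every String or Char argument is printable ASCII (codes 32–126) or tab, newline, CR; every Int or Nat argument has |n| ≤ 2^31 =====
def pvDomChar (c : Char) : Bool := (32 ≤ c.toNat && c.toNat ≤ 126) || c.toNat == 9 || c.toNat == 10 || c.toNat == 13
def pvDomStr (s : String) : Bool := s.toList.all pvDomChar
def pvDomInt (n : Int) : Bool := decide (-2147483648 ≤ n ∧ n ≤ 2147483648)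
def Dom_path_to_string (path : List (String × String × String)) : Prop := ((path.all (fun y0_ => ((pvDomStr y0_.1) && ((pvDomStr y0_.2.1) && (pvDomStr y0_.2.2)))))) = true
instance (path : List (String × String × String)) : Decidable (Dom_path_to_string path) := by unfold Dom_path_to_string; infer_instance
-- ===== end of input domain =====

-- B replaces A's enumerate loop (i==0 branch + repeated +=) by collecting tokens and one " -> ".join; same output.

-- ===== PORT A =====
def path_to_string (path : List (String × String × String)) : String :=
  PySem.Str.strip
    ((PySem.List.enumerate path).foldl
      (fun result ip =>
        if ip.1 == 0 then
          result ++ (ip.2.1 ++ " -> " ++ ip.2.2.1 ++ " -> " ++ ip.2.2.2)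
        else
          result ++ (" -> " ++ ip.2.2.1 ++ " -> " ++ ip.2.2.2))
      "")

-- ===== PORT B =====
def path_to_string_alt (path : List (String × String × String)) : String :=
  match path with
  | [] => ""
  | (h, _, _) :: _ =>
    PySem.Str.strip
      (PySem.Str.join " -> "
        (path.foldl (fun tokens p => tokens ++ [p.2.1, p.2.2]) [h]))

-- ===== PRECONDITION & SPEC =====
def Spec_path_to_string (path : List (String × String × String)) (out : String) : Prop := out = path_to_string_alt path
instance (path : List (String × String × String)) (out : String) : Decidable (Spec_path_to_string path out) := by unfold Spec_path_to_string; infer_instance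

-- ===== CLAIM (what is proved, stated in full; the proofs are below) =====
def Claim_equal_path_to_string : Prop := ∀ (path : List (String × String × String)), Dom_path_to_string path → Spec_path_to_string path (path_to_string path)

-- ===== LEMMAS AND PROOFS =====

-- helper: string equality from equal character lists
theorem pv_str_eq_of_toList {a b : String} (h : a.toList = b.toList) : a = b := by
  have h2 := congrArg String.ofList h
  rwa [String.ofList_toList, String.ofList_toList] at h2

-- the characters contributed by the non-first triples, A-side shape
def pvTail (rest : List (String × String × String)) : List Char :=
  rest.foldr (fun p acc => (" -> " ++ p.2.1 ++ " -> " ++ p.2.2).toList ++ acc) []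

-- A's loop over the non-zero-indexed triples appends pvTail
theorem pv_tailA (rest : List (String × String × String)) :
    ∀ (s : String) (k : Int), 0 < k →
      ((PySem.List.enumerate rest k).foldl
        (fun result ip =>
          if ip.1 == 0 then
            result ++ (ip.2.1 ++ " -> " ++ ip.2.2.1 ++ " -> " ++ ip.2.2.2)
          else
            result ++ (" -> " ++ ip.2.2.1 ++ " -> " ++ ip.2.2.2)) s).toList
      = s.toList ++ pvTail rest := by
  induction rest with
  | nil => intro s k hk; simp [PySem.List.enumerate_nil, pvTail]
  | cons p rest ih =>
    intro s k hk
    have hk0 : (k == 0) = false := by simp; omega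
    rw [PySem.List.enumerate_cons, List.foldl_cons]
    simp only [hk0, Bool.false_eq_true, if_false]
    rw [ih _ (k + 1) (by omega)]
    simp [pvTail, String.toList_append, List.append_assoc]

-- B's token-collecting loop is an append of a flatMap
theorem pv_tailB (rest : List (String × String × String)) :
    ∀ (acc : List String),
      rest.foldl (fun tokens p => tokens ++ [p.2.1, p.2.2]) acc
      = acc ++ rest.flatMap (fun p => [p.2.1, p.2.2]) := by
  induction rest with
  | nil => intro acc; simp
  | cons p rest ih => intro acc; rw [List.foldl_cons, ih]; simp

-- joining the flat token list with " -> " yields pvTail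
theorem pv_join_tail (rest : List (String × String × String)) :
    ∀ (a : List Char),
      PySem.Chars.join (" -> ".toList)
        (a :: rest.flatMap (fun p => [p.2.1.toList, p.2.2.toList]))
      = a ++ pvTail rest := by
  induction rest with
  | nil => intro a; simp [PySem.Chars.join_singleton, pvTail]
  | cons p rest ih =>
    intro a
    simp only [List.flatMap_cons, List.cons_append, List.nil_append]
    rw [PySem.Chars.join_cons_cons, PySem.Chars.join_cons_cons, ih]
    simp [pvTail, String.toList_append, List.append_assoc]

theorem pv_main (path : List (String × String × String)) :
    path_to_string path = path_to_string_alt path := by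
  cases path with
  | nil => decide
  | cons p rest =>
    obtain ⟨h, r, t⟩ := p
    unfold path_to_string path_to_string_alt
    show PySem.Str.strip _
        = PySem.Str.strip (PySem.Str.join " -> "
            (List.foldl (fun tokens p => tokens ++ [p.2.1, p.2.2]) [h] ((h, r, t) :: rest)))
    rw [pv_tailB ((h, r, t) :: rest) [h]]
    apply congrArg PySem.Str.strip
    apply pv_str_eq_of_toList
    rw [PySem.List.enumerate_cons, List.foldl_cons]
    simp only [show ((0 : Int) == 0) = true from rfl, if_true]
    rw [pv_tailA rest _ (0 + 1) (by omega)]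
    rw [PySem.Str.toList_join]
    simp only [List.nil_append, List.cons_append, List.map_cons, List.map_flatMap]
    simp only [List.map_nil, List.flatMap_cons, List.cons_append, List.nil_append]
    rw [PySem.Chars.join_cons_cons, PySem.Chars.join_cons_cons, pv_join_tail]
    simp [String.toList_append, List.append_assoc]

-- ===== VERDICT (by name: the statement is the Claim_ definition above) =====
theorem path_to_string_spec : Claim_equal_path_to_string := by
  intro path _
  exact pv_main path
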